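-- pv_equiv track=rewrite | github.com/EgorSavchuk/autoMOZI | task3.py | print_lcm
-- ===== SOURCE A (Python) =====
-- def print_lcm(full_cycle):
--     """
--     :param full_cycle: Цикл подстановки
--     :return: список цифр из которых вычисляется НОК
--     """
--     cycles_len = []
--     for one_cycle in full_cycle:
--         cycles_len.append(len(one_cycle))
--     result = ''
--     for i in str(cycles_len):
--         if i == '[':
--             result += ''
--         elif i == ']':
--             result += ''
--         else:
--             result += i
--     return result
-- ===== SOURCE B (Python) =====
-- def print_lcm(full_cycle):
--     """
--     :param full_cycle: Цикл подстановки
--     :return: список цифр из которых вычисляется НОК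
--     """
--     return ', '.join(str(len(one_cycle)) for one_cycle in full_cycle)
-- ===== Notes on version B (the rewrite author's own statement) =====
-- stated objective: simpler
-- what changed: B joins the cycle lengths directly with ', ' instead of building a list, taking its str() repr and filtering out bracket characters one by one.
import Mathlib
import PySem

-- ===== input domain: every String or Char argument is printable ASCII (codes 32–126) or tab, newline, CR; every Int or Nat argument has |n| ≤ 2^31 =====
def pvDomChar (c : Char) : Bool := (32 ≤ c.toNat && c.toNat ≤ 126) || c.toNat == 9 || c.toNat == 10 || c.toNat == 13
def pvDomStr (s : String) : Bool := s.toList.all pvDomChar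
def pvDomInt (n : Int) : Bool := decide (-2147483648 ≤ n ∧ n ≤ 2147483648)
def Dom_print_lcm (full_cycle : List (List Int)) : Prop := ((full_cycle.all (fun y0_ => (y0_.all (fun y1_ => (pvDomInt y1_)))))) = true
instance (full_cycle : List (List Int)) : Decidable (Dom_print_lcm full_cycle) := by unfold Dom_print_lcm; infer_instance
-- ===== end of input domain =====

-- ===== PORT A =====
-- Port of A. The growing Python strings are modelled as Char lists (result += i appends a
-- Char), wrapped into a String at the end. str(cycles_len) — the repr of a Python list of
-- ints — is exactly '[' + ", ".join(str(x) for x in cycles_len) + ']', ported with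
-- PySem.Int.toChars for str(x) and PySem.Chars.join for the ", " joining (exact here
-- because every element is an int).
def print_lcm (full_cycle : List (List Int)) : String :=
  let cycles_len : List Int := full_cycle.foldl (fun acc one_cycle => acc ++ [(one_cycle.length : Int)]) []
  let s : List Char := '[' :: (PySem.Chars.join (", ".toList) (cycles_len.map PySem.Int.toChars) ++ [']'])
  String.ofList (s.foldl (fun result i =>
    if i = '[' then result ++ []
    else if i = ']' then result ++ []
    else result ++ [i]) [])

-- ===== PORT B =====
-- B: ', '.join(str(len(one_cycle)) for one_cycle in full_cycle)
def print_lcm_alt (full_cycle : List (List Int)) : String :=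
  PySem.Str.join ", " (full_cycle.map (fun one_cycle => PySem.Int.toStr (one_cycle.length : Int)))

-- ===== PRECONDITION & SPEC =====
def Spec_print_lcm (full_cycle : List (List Int)) (out : String) : Prop := out = print_lcm_alt full_cycle
instance (full_cycle : List (List Int)) (out : String) : Decidable (Spec_print_lcm full_cycle out) := by unfold Spec_print_lcm; infer_instance

-- ===== CLAIM (what is proved, stated in full; the proofs are below) =====
def Claim_equal_print_lcm : Prop := ∀ (full_cycle : List (List Int)), Dom_print_lcm full_cycle → Spec_print_lcm full_cycle (print_lcm full_cycle)

-- ===== LEMMAS AND PROOFS =====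

-- the append-one-at-a-time accumulation of A's first loop is List.map
theorem pv_foldl_append_map (l : List (List Int)) (acc : List Int) :
    l.foldl (fun acc one_cycle => acc ++ [(one_cycle.length : Int)]) acc
      = acc ++ l.map (fun one_cycle => (one_cycle.length : Int)) := by
  induction l generalizing acc with
  | nil => simp
  | cons x xs ih => simp [List.foldl_cons, ih]

def pvKeep (c : Char) : Bool := c != '[' && c != ']'

-- A's character loop is a filter dropping '[' and ']'
theorem pv_foldl_filter (l : List Char) (acc : List Char) :
    l.foldl (fun result i =>
      if i = '[' then result ++ []
      else if i = ']' then result ++ []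
      else result ++ [i]) acc = acc ++ l.filter pvKeep := by
  induction l generalizing acc with
  | nil => simp
  | cons c cs ih =>
    rw [List.foldl_cons, ih]
    by_cases h1 : c = '['
    · simp [h1, pvKeep]
    · by_cases h2 : c = ']'
      · simp [h2, pvKeep]
      · simp [h1, h2, pvKeep]

theorem pv_digitChar_keep (m : Nat) : pvKeep (Nat.digitChar m) = true := by
  rcases Nat.lt_or_ge m 16 with h | h
  · interval_cases m <;> rfl
  · have hs : Nat.digitChar m = '*' := by
      simp only [Nat.digitChar]
      repeat rw [if_neg (by omega)]
    rw [hs]; rfl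

theorem pv_toDigitsCore_keep (fuel n : Nat) (acc : List Char)
    (h : ∀ c ∈ acc, pvKeep c = true) : ∀ c ∈ Nat.toDigitsCore 10 fuel n acc, pvKeep c = true := by
  induction fuel generalizing n acc with
  | zero => simpa [Nat.toDigitsCore] using h
  | succ f ih =>
    intro c hc
    simp only [Nat.toDigitsCore] at hc
    split at hc
    · rcases List.mem_cons.mp hc with h1 | h1
      · simpa [h1] using pv_digitChar_keep (n % 10)
      · exact h _ h1
    · refine ih _ _ ?_ _ hc
      intro d hd
      rcases List.mem_cons.mp hd with h1 | h1
      · simpa [h1] using pv_digitChar_keep (n % 10)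
      · exact h _ h1

theorem pv_toChars_keep (n : Int) : ∀ c ∈ PySem.Int.toChars n, pvKeep c = true := by
  intro c hc
  unfold PySem.Int.toChars at hc
  split at hc
  · rcases List.mem_cons.mp hc with h1 | h1
    · simp [h1, pvKeep]
    · exact pv_toDigitsCore_keep _ _ _ (by simp) _ h1
  · exact pv_toDigitsCore_keep _ _ _ (by simp) _ hc

theorem pv_join_keep (parts : List (List Char))
    (hp : ∀ p ∈ parts, ∀ c ∈ p, pvKeep c = true) :
    ∀ c ∈ PySem.Chars.join (", ".toList) parts, pvKeep c = true := by
  induction parts with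
  | nil => simp [PySem.Chars.join_nil]
  | cons p ps ih =>
    intro c hc
    cases ps with
    | nil =>
      rw [PySem.Chars.join_singleton] at hc
      exact hp p (by simp) c hc
    | cons q qs =>
      rw [PySem.Chars.join_cons_cons] at hc
      rcases List.mem_append.mp hc with h1 | h1
      · rcases List.mem_append.mp h1 with h2 | h2
        · exact hp p (by simp) c h2
        · have : c = ',' ∨ c = ' ' := by simpa using h2
          rcases this with h | h <;> simp [h, pvKeep]
      · exact ih (fun r hr => hp r (by simp [hr])) c h1

-- ===== VERDICT (by name: the statement is the Claim_ definition above) =====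
theorem print_lcm_spec : Claim_equal_print_lcm := by
  intro full_cycle _
  show print_lcm full_cycle = print_lcm_alt full_cycle
  unfold print_lcm print_lcm_alt PySem.Str.join
  simp only [pv_foldl_append_map, pv_foldl_filter, List.nil_append]
  apply congrArg String.ofList
  have hbody : ∀ c ∈ PySem.Chars.join (", ".toList)
      ((full_cycle.map (fun one_cycle => (one_cycle.length : Int))).map PySem.Int.toChars),
      pvKeep c = true := by
    apply pv_join_keep
    intro p hp
    rcases List.mem_map.mp hp with ⟨n, _, rfl⟩
    exact pv_toChars_keep n
  rw [List.filter_cons, List.filter_append, List.filter_eq_self.mpr hbody]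
  have h1 : (pvKeep '[') = false := by rfl
  have h2 : List.filter pvKeep [']'] = [] := by rfl
  have h3 : (String.toList ∘ fun one_cycle : List Int => PySem.Int.toStr (one_cycle.length : Int))
      = (PySem.Int.toChars ∘ fun one_cycle : List Int => (one_cycle.length : Int)) := by
    funext one_cycle
    exact PySem.Int.toList_toStr _
  simp only [h1, h2, Bool.false_eq_true, if_false, List.append_nil, List.map_map, h3]
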